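-- pv_equiv track=rewrite | github.com/vigusmao/vigusmao.github.io | python/watermarking.py | check_bitonic_property
-- ===== SOURCE A (Python) =====
-- def check_bitonic_property(permutation):
--
--     if permutation[1] > permutation[0]:
--         direction = 1
--     else:
--         direction = -1
--
--     index = 1
--     changed_direction = False
--     while index < len(permutation):
--         if (permutation[index] - permutation[index-1]) * direction < 0:
--             if changed_direction:
--                 return False
--             else:
--                 direction = -1 * direction
--                 changed_direction = True
--         index += 1
--     return True
-- ===== SOURCE B (Python) =====
-- def check_bitonic_property(permutation):
--     signs = [1 if permutation[1] > permutation[0] else -1]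
--     for i in range(1, len(permutation)):
--         d = permutation[i] - permutation[i - 1]
--         if d > 0:
--             signs.append(1)
--         elif d < 0:
--             signs.append(-1)
--     changes = sum(1 for a, b in zip(signs, signs[1:]) if a != b)
--     return changes <= 1
-- ===== Notes on version B (the rewrite author's own statement) =====
-- stated objective: alternative
-- what changed: Replaces A's running flip state machine (direction/changed_direction flags with an early return) by first building the list of nonzero movement signs seeded with the initial direction and then counting adjacent sign transitions, returning count <= 1.
import Mathlib
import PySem

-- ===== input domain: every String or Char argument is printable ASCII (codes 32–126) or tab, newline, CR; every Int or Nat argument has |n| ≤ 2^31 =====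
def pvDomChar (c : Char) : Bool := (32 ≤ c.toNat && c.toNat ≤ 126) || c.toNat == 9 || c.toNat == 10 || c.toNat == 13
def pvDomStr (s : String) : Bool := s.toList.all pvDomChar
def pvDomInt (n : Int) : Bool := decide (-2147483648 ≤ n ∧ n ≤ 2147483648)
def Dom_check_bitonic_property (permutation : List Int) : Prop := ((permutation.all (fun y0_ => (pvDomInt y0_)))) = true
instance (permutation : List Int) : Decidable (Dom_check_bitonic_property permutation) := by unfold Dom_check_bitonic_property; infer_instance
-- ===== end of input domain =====

-- B replaces A's in-loop flip state machine by building the list of movement signs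
-- and counting adjacent sign transitions (alternative decomposition, same cost).

-- ===== PORT A =====
-- A's while loop; inside Pre_ every index accessed is in range, so getD is exact.
def pvALoop (perm : List Int) (direction : Int) (changed : Bool) (index : Nat) : Bool :=
  if h : index < perm.length then
    if (perm.getD index 0 - perm.getD (index - 1) 0) * direction < 0 then
      if changed then false
      else pvALoop perm (-1 * direction) true (index + 1)
    else pvALoop perm direction changed (index + 1)
  else true
termination_by perm.length - index
decreasing_by all_goals omega

def check_bitonic_property (permutation : List Int) : Bool :=
  let direction : Int := if permutation.getD 1 0 > permutation.getD 0 0 then 1 else -1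
  pvALoop permutation direction false 1

-- ===== PORT B =====
def pvBSigns (perm : List Int) : List Int :=
  (List.range' 1 (perm.length - 1)).foldl
    (fun acc i =>
      let d := perm.getD i 0 - perm.getD (i - 1) 0
      if d > 0 then acc ++ [1] else if d < 0 then acc ++ [-1] else acc)
    [if perm.getD 1 0 > perm.getD 0 0 then (1 : Int) else -1]

def pvBChanges (signs : List Int) : Nat :=
  (signs.zip signs.tail).foldl (fun c p => if p.1 ≠ p.2 then c + 1 else c) 0

def check_bitonic_property_alt (permutation : List Int) : Bool :=
  decide (pvBChanges (pvBSigns permutation) ≤ 1)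

-- ===== PRECONDITION & SPEC =====
-- Pre_ excludes lists of length < 2, on which Python A (and B) raises IndexError at permutation[1].
def Pre_check_bitonic_property (permutation : List Int) : Prop := 2 ≤ permutation.length
instance (permutation : List Int) : Decidable (Pre_check_bitonic_property permutation) := by
  unfold Pre_check_bitonic_property; infer_instance
def pvWitness_check_bitonic_property : List Int := [1, 3, 2]

def Spec_check_bitonic_property (permutation : List Int) (out : Bool) : Prop := out = check_bitonic_property_alt permutation
instance (permutation : List Int) (out : Bool) : Decidable (Spec_check_bitonic_property permutation out) := by unfold Spec_check_bitonic_property; infer_instance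

-- ===== CLAIM (what is proved, stated in full; the proofs are below) =====
def Claim_equal_check_bitonic_property : Prop := ∀ (permutation : List Int), Dom_check_bitonic_property permutation → Pre_check_bitonic_property permutation → Spec_check_bitonic_property permutation (check_bitonic_property permutation)

-- ===== LEMMAS AND PROOFS =====

-- number of transitions in the sign sequence dir :: l
def pvChg (dir : Int) : List Int → Nat
  | [] => 0
  | s :: rest => (if s ≠ dir then 1 else 0) + pvChg s rest

-- the signs A's loop would see from position i on (nonzero differences only)
def pvSignsFrom (perm : List Int) (i : Nat) : List Int :=
  if h : i < perm.length then
    let d := perm.getD i 0 - perm.getD (i - 1) 0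
    if d > 0 then 1 :: pvSignsFrom perm (i + 1)
    else if d < 0 then (-1) :: pvSignsFrom perm (i + 1)
    else pvSignsFrom perm (i + 1)
  else []
termination_by perm.length - i
decreasing_by all_goals omega

theorem pvALoop_eq_chg (perm : List Int) (direction : Int) (changed : Bool) (index : Nat)
    (hd : direction = 1 ∨ direction = -1) :
    pvALoop perm direction changed index
      = decide (pvChg direction (pvSignsFrom perm index) + (if changed then 1 else 0) ≤ 1) := by
  revert hd
  induction direction, changed, index using pvALoop.induct perm with
  | case1 direction index h hneg =>
      -- in-range, sign flips, already changed: A returns false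
      intro hd
      rw [pvALoop, pvSignsFrom]
      simp only [h, dif_pos, hneg, if_pos]
      set d := perm.getD index 0 - perm.getD (index - 1) 0 with hdq
      rcases lt_trichotomy d 0 with hlt | heq | hgt
      · have hdir : direction = 1 := by
          rcases hd with h1 | h1 <;> subst h1
          · rfl
          · exfalso; nlinarith
        subst hdir
        simp [show ¬ d > 0 by omega, hlt, pvChg]
      · exfalso; rw [heq] at hneg; simp at hneg
      · have hdir : direction = -1 := by
          rcases hd with h1 | h1 <;> subst h1
          · exfalso; nlinarith
          · rfl
        subst hdir
        simp [hgt, pvChg]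
  | case2 direction changed index h hneg hch ih =>
      -- in-range, sign flips, first change: flip direction
      intro hd
      have hch0 : changed = false := by simpa using hch
      subst hch0
      rw [pvALoop, pvSignsFrom]
      simp only [h, dif_pos, hneg, if_pos, Bool.false_eq_true, if_false]
      rw [ih (by rcases hd with h1 | h1 <;> subst h1 <;> simp)]
      set d := perm.getD index 0 - perm.getD (index - 1) 0 with hdq
      rcases hd with h1 | h1 <;> subst h1
      · have hlt : d < 0 := by nlinarith
        simp [show ¬ d > 0 by omega, hlt, pvChg]
      · have hgt : d > 0 := by nlinarith
        simp [hgt, pvChg]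
  | case3 direction changed index h hneg ih =>
      -- in-range, no flip: same direction, same state
      intro hd
      rw [pvALoop, pvSignsFrom]
      simp only [h, dif_pos, hneg, if_false]
      rw [ih hd]
      set d := perm.getD index 0 - perm.getD (index - 1) 0 with hdq
      rcases hd with h1 | h1 <;> subst h1
      · rcases lt_trichotomy d 0 with hlt | heq | hgt
        · exact absurd (by nlinarith : d * 1 < 0) hneg
        · simp [heq]
        · simp [hgt, pvChg]
      · rcases lt_trichotomy d 0 with hlt | heq | hgt
        · simp [show ¬ d > 0 by omega, hlt, pvChg]
        · simp [heq]
        · exact absurd (by nlinarith : d * (-1) < 0) hneg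
  | case4 direction changed index h =>
      intro _
      rw [pvALoop, pvSignsFrom]
      simp only [h]
      cases changed <;> simp [pvChg]

theorem pvSigns_fold (perm : List Int) :
    ∀ (n i : Nat) (acc : List Int), i + n = perm.length →
      (List.range' i n).foldl
        (fun acc i =>
          let d := perm.getD i 0 - perm.getD (i - 1) 0
          if d > 0 then acc ++ [1] else if d < 0 then acc ++ [-1] else acc) acc
        = acc ++ pvSignsFrom perm i := by
  intro n
  induction n with
  | zero =>
      intro i acc h
      rw [pvSignsFrom]
      simp [show ¬ i < perm.length by omega]
  | succ n ih =>
      intro i acc h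
      rw [List.range'_succ, List.foldl_cons, ih (i + 1) _ (by omega)]
      conv_rhs => rw [pvSignsFrom]
      simp only [show i < perm.length by omega, dif_pos]
      set d := perm.getD i 0 - perm.getD (i - 1) 0 with hdq
      rcases lt_trichotomy d 0 with hlt | heq | hgt
      · simp [show ¬ d > 0 by omega, hlt]
      · simp [heq]
      · simp [hgt]

theorem pvBSigns_eq (perm : List Int) (h : 1 ≤ perm.length) :
    pvBSigns perm
      = (if perm.getD 1 0 > perm.getD 0 0 then (1 : Int) else -1) :: pvSignsFrom perm 1 := by
  unfold pvBSigns
  rw [pvSigns_fold perm (perm.length - 1) 1 _ (by omega)]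
  simp

theorem pvBChanges_aux (l : List Int) : ∀ (a : Int) (n : Nat),
    ((a :: l).zip l).foldl (fun c p => if p.1 ≠ p.2 then c + 1 else c) n = n + pvChg a l := by
  induction l with
  | nil => intro a n; simp [pvChg]
  | cons b l ih =>
      intro a n
      simp only [List.zip_cons_cons, List.foldl_cons, pvChg, ih]
      rcases eq_or_ne a b with h | h
      · simp [h]
      · simp [h, h.symm]
        omega

theorem pvBChanges_eq (a : Int) (l : List Int) :
    pvBChanges (a :: l) = pvChg a l := by
  unfold pvBChanges
  rw [List.tail_cons, pvBChanges_aux]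
  omega

-- ===== VERDICT (by name: the statement is the Claim_ definition above) =====
theorem check_bitonic_property_spec : Claim_equal_check_bitonic_property := by
  intro perm _ hpre
  unfold Spec_check_bitonic_property check_bitonic_property check_bitonic_property_alt
  have h1 : 1 ≤ perm.length := by
    unfold Pre_check_bitonic_property at hpre; omega
  rw [pvBSigns_eq perm h1, pvBChanges_eq]
  split <;>
    rw [pvALoop_eq_chg _ _ _ _ (by simp)] <;> simp
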